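-- pv_equiv track=rewrite | github.com/C0S-T/String-Operations | testing.py | count_rep
-- ===== SOURCE A (Python) =====
-- from collections import Counter
--
-- def count_rep(l):   #function to count repetition of words in a single line,with parameter as list l
--     count = 0
--     sentence = Counter(l.lower().split())      #converts all letters into lower case & split each word by space     #initialize counter variable
--     for w,val in sentence.items():
--         if val > 1:
--             count += 1
--         else: None
--     return count
-- ===== SOURCE B (Python) =====
-- def count_rep(l):
--     seen = set()
--     repeated = set()
--     for w in l.lower().split():
--         if w in seen:
--             repeated.add(w)
--         else:
--             seen.add(w)
--     return len(repeated)
-- ===== Notes on version B (the rewrite author's own statement) =====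
-- stated objective: simpler
-- what changed: Replaces the Counter build plus a second pass over its items with a single pass over the tokens maintaining seen/repeated sets and returning len(repeated).
import Mathlib
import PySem

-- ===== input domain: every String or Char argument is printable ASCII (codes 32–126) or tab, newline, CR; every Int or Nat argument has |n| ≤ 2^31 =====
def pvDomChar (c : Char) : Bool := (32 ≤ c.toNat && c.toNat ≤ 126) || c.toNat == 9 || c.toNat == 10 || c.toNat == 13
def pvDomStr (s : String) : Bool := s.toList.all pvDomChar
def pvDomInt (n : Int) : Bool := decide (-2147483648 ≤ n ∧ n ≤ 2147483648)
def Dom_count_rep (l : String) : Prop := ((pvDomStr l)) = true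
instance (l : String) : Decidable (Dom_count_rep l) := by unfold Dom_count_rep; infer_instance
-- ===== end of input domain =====

-- B replaces A's Counter-then-scan-items with a single pass keeping seen/repeated sets (simpler, same cost).

-- ===== PORT A =====
def count_rep (l : String) : Int :=
  let sentence := PySem.Dict.counter (PySem.Str.split₀ (PySem.Str.lower l))
  sentence.items.foldl (fun count wv => if wv.2 > 1 then count + 1 else count) 0

-- ===== PORT B =====
def count_rep_alt (l : String) : Int :=
  let res := (PySem.Str.split₀ (PySem.Str.lower l)).foldl
    (fun (sr : PySem.Set String × PySem.Set String) (w : String) =>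
      if PySem.Set.contains sr.1 w then (sr.1, PySem.Set.add sr.2 w)
      else (PySem.Set.add sr.1 w, sr.2))
    (PySem.Set.empty, PySem.Set.empty)
  PySem.Set.len res.2

-- ===== PRECONDITION & SPEC =====
def Spec_count_rep (l : String) (out : Int) : Prop := out = count_rep_alt l
instance (l : String) (out : Int) : Decidable (Spec_count_rep l out) := by unfold Spec_count_rep; infer_instance

-- ===== CLAIM (what is proved, stated in full; the proofs are below) =====
def Claim_equal_count_rep : Prop := ∀ (l : String), Dom_count_rep l → Spec_count_rep l (count_rep l)

-- ===== LEMMAS AND PROOFS =====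

-- A's conditional-count loop over the mapped items is a filter length.
lemma foldl_count (f : String → Int) :
    ∀ (xs : List String) (n : Int),
      xs.foldl (fun c k => if f k > 1 then c + 1 else c) n
        = n + ((xs.filter (fun k => decide (1 < f k))).length : Int) := by
  intro xs
  induction xs with
  | nil => intro n; simp
  | cons x t ih =>
    intro n
    by_cases h : 1 < f x
    · simp [List.foldl_cons, List.filter_cons, h, ih]
      push_cast
      omega
    · simp [List.foldl_cons, List.filter_cons, h, ih]

-- B's loop invariant: the repeated set is nodup and holds exactly the words seen at least twice.
lemma loopB :
    ∀ (ws : List String) (s r : PySem.Set String),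
      s.Nodup → r.Nodup → (∀ x ∈ r, x ∈ s) →
      (ws.foldl
        (fun (sr : PySem.Set String × PySem.Set String) (w : String) =>
          if PySem.Set.contains sr.1 w then (sr.1, PySem.Set.add sr.2 w)
          else (PySem.Set.add sr.1 w, sr.2)) (s, r)).2.Nodup ∧
      (∀ x, x ∈ (ws.foldl
        (fun (sr : PySem.Set String × PySem.Set String) (w : String) =>
          if PySem.Set.contains sr.1 w then (sr.1, PySem.Set.add sr.2 w)
          else (PySem.Set.add sr.1 w, sr.2)) (s, r)).2 ↔
        x ∈ r ∨ (x ∈ s ∧ x ∈ ws) ∨ 1 < ws.count x) := by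
  intro ws
  induction ws with
  | nil =>
    intro s r hs hr hrs
    exact ⟨hr, fun x => by simp⟩
  | cons w t ih =>
    intro s r hs hr hrs
    simp only [List.foldl_cons]
    by_cases hw : w ∈ s
    · have hc : PySem.Set.contains s w = true := by
        simp [PySem.Set.contains_iff, hw]
      simp only [hc, if_true]
      obtain ⟨h1, h2⟩ := ih s (PySem.Set.add r w) hs (PySem.Set.nodup_add r w hr)
        (by intro x hx; rcases (PySem.Set.mem_add r w x).mp hx with h | h
            · exact hrs x h
            · exact h ▸ hw)
      refine ⟨h1, fun x => ?_⟩
      rw [h2 x, PySem.Set.mem_add]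
      by_cases hxw : x = w
      · subst hxw
        simp [hw]
      · have hwx : ¬ (w = x) := fun h => hxw h.symm
        simp [hxw, hwx]
    · have hc : PySem.Set.contains s w = false := by
        simp [PySem.Set.contains_iff, hw]
      simp only [hc, Bool.false_eq_true, if_false]
      obtain ⟨h1, h2⟩ := ih (PySem.Set.add s w) r (PySem.Set.nodup_add s w hs) hr
        (by intro x hx; exact (PySem.Set.mem_add s w x).mpr (Or.inl (hrs x hx)))
      refine ⟨h1, fun x => ?_⟩
      rw [h2 x]
      by_cases hxw : x = w
      · subst hxw
        have hnr : x ∉ r := fun h => hw (hrs x h)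
        have hmt : x ∈ t ↔ 0 < List.count x t := List.count_pos_iff.symm
        simp only [hnr, false_or, hw, false_and, PySem.Set.mem_add, List.mem_cons,
          List.count_cons_self, hmt, true_or, and_true, true_and, or_false, eq_self_iff_true]
        omega
      · have hwx : ¬ (w = x) := fun h => hxw h.symm
        simp [PySem.Set.mem_add, hxw, hwx]

lemma length_eq_of_nodup_of_mem_iff (l1 l2 : List String) (h1 : l1.Nodup) (h2 : l2.Nodup)
    (h : ∀ x, x ∈ l1 ↔ x ∈ l2) : l1.length = l2.length := by
  rw [← List.toFinset_card_of_nodup h1, ← List.toFinset_card_of_nodup h2]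
  congr 1
  ext x
  simp [h x]

-- Core equivalence on the shared token list.
theorem core_eq (ws : List String) :
    (PySem.Dict.counter ws).items.foldl (fun count wv => if wv.2 > 1 then count + 1 else count) (0 : Int)
      = PySem.Set.len (ws.foldl
          (fun (sr : PySem.Set String × PySem.Set String) (w : String) =>
            if PySem.Set.contains sr.1 w then (sr.1, PySem.Set.add sr.2 w)
            else (PySem.Set.add sr.1 w, sr.2))
          (PySem.Set.empty, PySem.Set.empty)).2 := by
  rw [PySem.Dict.items_counter, List.foldl_map]
  rw [foldl_count (fun k => ((List.count k ws : Nat) : Int)) (PySem.Set.ofList ws) 0]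
  obtain ⟨h1, h2⟩ := loopB ws PySem.Set.empty PySem.Set.empty (by simp [PySem.Set.empty])
    (by simp [PySem.Set.empty]) (by simp [PySem.Set.empty])
  simp only [PySem.Set.len, zero_add]
  congr 1
  apply length_eq_of_nodup_of_mem_iff
  · exact List.Nodup.filter _ (PySem.Set.nodup_ofList ws)
  · exact h1
  · intro x
    rw [List.mem_filter, PySem.Set.mem_ofList, h2 x]
    simp only [PySem.Set.empty, List.not_mem_nil, false_or, false_and]
    constructor
    · rintro ⟨hm, hp⟩
      simp only [decide_eq_true_eq] at hp
      exact_mod_cast hp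
    · intro hcnt
      refine ⟨List.count_pos_iff.mp (by omega), ?_⟩
      simp only [decide_eq_true_eq]
      exact_mod_cast hcnt

-- ===== VERDICT (by name: the statement is the Claim_ definition above) =====
theorem count_rep_spec : Claim_equal_count_rep := by
  intro l _
  show count_rep l = count_rep_alt l
  exact core_eq (PySem.Str.split₀ (PySem.Str.lower l))
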